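-- pv_equiv track=rewrite | github.com/baden/api.navi.cc | src/libraries/acl.py | isFieldsAllowed
-- ===== SOURCE A (Python) =====
-- def isFieldsAllowed(fields, allowed_fields, denied_fields):
--     #if no fields are supplied return result
--     if not fields:
--         return None
--
--     if not isinstance(fields, list):
--         fields = [fields]
--
--     #get allowed and denied
--     if allowed_fields is None and denied_fields is None:
--         # no field rules
--         return None
--     for field in fields:
--         if field == '_id' and (not denied_fields or denied_fields and field not in denied_fields):
--             continue
--
--         #check field. Because merging field can be in both filters
--         if allowed_fields and (field not in allowed_fields and "$all" not in allowed_fields):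
--             return False
--         if denied_fields and (field in denied_fields or '$all' in denied_fields):
--             return False
--     return True
-- ===== SOURCE B (Python) =====
-- def isFieldsAllowed(fields, allowed_fields, denied_fields):
--     if not fields:
--         return None
--     if not isinstance(fields, list):
--         fields = [fields]
--     if allowed_fields is None and denied_fields is None:
--         return None
--     allowed = set(allowed_fields) if allowed_fields else set()
--     denied = set(denied_fields) if denied_fields else set()
--     check = set(fields)
--     if not denied or '_id' not in denied:
--         check.discard('_id')
--     if allowed and '$all' not in allowed and (check - allowed):
--         return False
--     if denied and check and ('$all' in denied or (check & denied)):
--         return False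
--     return True
-- ===== Notes on version B (the rewrite author's own statement) =====
-- stated objective: idiomatic
-- what changed: Replaces the per-field loop with set algebra: build a working set of fields (discarding '_id' unless it is explicitly denied) and decide the result with two whole-set checks (difference against allowed, intersection/'$all' against denied).
import Mathlib
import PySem

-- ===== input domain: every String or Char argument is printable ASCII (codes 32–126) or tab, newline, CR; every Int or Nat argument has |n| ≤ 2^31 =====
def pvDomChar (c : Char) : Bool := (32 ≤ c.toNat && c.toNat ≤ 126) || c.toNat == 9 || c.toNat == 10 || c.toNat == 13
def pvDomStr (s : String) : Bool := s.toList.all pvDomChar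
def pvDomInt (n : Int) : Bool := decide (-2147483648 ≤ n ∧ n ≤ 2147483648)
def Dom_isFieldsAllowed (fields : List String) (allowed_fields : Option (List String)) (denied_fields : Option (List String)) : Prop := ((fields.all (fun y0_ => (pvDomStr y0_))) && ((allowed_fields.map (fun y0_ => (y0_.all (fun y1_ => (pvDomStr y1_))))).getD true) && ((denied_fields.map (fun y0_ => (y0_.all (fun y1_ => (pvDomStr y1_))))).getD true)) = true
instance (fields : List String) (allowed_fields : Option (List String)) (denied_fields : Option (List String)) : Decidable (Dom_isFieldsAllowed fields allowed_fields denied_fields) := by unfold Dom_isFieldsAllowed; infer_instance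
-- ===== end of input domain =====

-- B replaces A's per-field loop by set algebra (a working set with '_id' discarded unless explicitly denied, then two whole-set rule checks); objective: idiomatic.

-- ===== PORT A =====
-- Python truthiness of an Optional[list]: None and [] are falsy.
def pvTruthy (o : Option (List String)) : Bool :=
  match o with
  | none => false
  | some l => !l.isEmpty

-- the 'for field in fields' loop of A, returning the bool A returns
def pvLoopA (a d : Option (List String)) : List String → Bool
  | [] => true
  | f :: rest =>
    if f = "_id" && (!pvTruthy d || (pvTruthy d && !(d.getD []).contains f)) then
      pvLoopA a d rest
    else if pvTruthy a && (!(a.getD []).contains f && !(a.getD []).contains "$all") then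
      false
    else if pvTruthy d && ((d.getD []).contains f || (d.getD []).contains "$all") then
      false
    else pvLoopA a d rest

def isFieldsAllowed (fields : List String) (allowed_fields : Option (List String)) (denied_fields : Option (List String)) : Option Bool :=
  if fields.isEmpty then none
  else if allowed_fields.isNone && denied_fields.isNone then none
  else some (pvLoopA allowed_fields denied_fields fields)

-- ===== PORT B =====
-- Python truthiness of an Optional[list] (B's own helper): None and [] are falsy.
def pvTruthyB (o : Option (List String)) : Bool :=
  match o with
  | none => false
  | some l => !l.isEmpty

def isFieldsAllowed_alt (fields : List String) (allowed_fields : Option (List String)) (denied_fields : Option (List String)) : Option Bool :=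
  if fields.isEmpty then none
  else if allowed_fields.isNone && denied_fields.isNone then none
  else
    let allowed : PySem.Set String := if pvTruthyB allowed_fields then PySem.Set.ofList (allowed_fields.getD []) else PySem.Set.empty
    let denied : PySem.Set String := if pvTruthyB denied_fields then PySem.Set.ofList (denied_fields.getD []) else PySem.Set.empty
    let check0 : PySem.Set String := PySem.Set.ofList fields
    let check : PySem.Set String :=
      if denied.isEmpty || !PySem.Set.contains denied "_id" then PySem.Set.discard check0 "_id" else check0
    if !allowed.isEmpty && (!PySem.Set.contains allowed "$all" && !(PySem.Set.diff check allowed).isEmpty) then some false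
    else if !denied.isEmpty && (!check.isEmpty && (PySem.Set.contains denied "$all" || !(PySem.Set.inter check denied).isEmpty)) then some false
    else some true

-- ===== PRECONDITION & SPEC =====
def Spec_isFieldsAllowed (fields : List String) (allowed_fields : Option (List String)) (denied_fields : Option (List String)) (out : Option Bool) : Prop := out = isFieldsAllowed_alt fields allowed_fields denied_fields
instance (fields : List String) (allowed_fields : Option (List String)) (denied_fields : Option (List String)) (out : Option Bool) : Decidable (Spec_isFieldsAllowed fields allowed_fields denied_fields out) := by unfold Spec_isFieldsAllowed; infer_instance

-- ===== CLAIM (what is proved, stated in full; the proofs are below) =====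
def Claim_equal_isFieldsAllowed : Prop := ∀ (fields : List String) (allowed_fields : Option (List String)) (denied_fields : Option (List String)), Dom_isFieldsAllowed fields allowed_fields denied_fields → Spec_isFieldsAllowed fields allowed_fields denied_fields (isFieldsAllowed fields allowed_fields denied_fields)

-- ===== LEMMAS AND PROOFS =====

theorem pvLoopA_eq_all (a d : Option (List String)) (fields : List String) :
    pvLoopA a d fields =
      fields.all (fun f =>
        (f = "_id" && (!pvTruthy d || (pvTruthy d && !(d.getD []).contains f))) ||
        (!(pvTruthy a && (!(a.getD []).contains f && !(a.getD []).contains "$all")) &&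
         !(pvTruthy d && ((d.getD []).contains f || (d.getD []).contains "$all")))) := by
  induction fields with
  | nil => rfl
  | cons f rest ih =>
    simp only [pvLoopA, List.all_cons]
    split_ifs with h1 h2 h3
    · simp only [h1, Bool.true_or, Bool.true_and, ih]
    · simp only [Bool.not_eq_true] at h1
      simp only [h1, h2, Bool.not_true, Bool.false_and, Bool.false_or,
        Bool.false_and, Bool.false_or]
    · simp only [Bool.not_eq_true] at h1 h2
      simp only [h1, h2, h3, Bool.not_true, Bool.not_false, Bool.and_false,
        Bool.false_or, Bool.false_and]
    · simp only [Bool.not_eq_true] at h1 h2 h3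
      simp only [h1, h2, h3, Bool.not_false, Bool.true_and, Bool.and_true, Bool.false_or, ih]

theorem pvTruthy_eq (o : Option (List String)) : pvTruthy o = !(o.getD []).isEmpty := by
  cases o <;> simp [pvTruthy]

theorem pvTruthyB_eq (o : Option (List String)) : pvTruthyB o = !(o.getD []).isEmpty := by
  cases o <;> simp [pvTruthyB]

theorem if_truthy_ofList (l : List String) :
    (if (!l.isEmpty) = true then PySem.Set.ofList l else PySem.Set.empty) = PySem.Set.ofList l := by
  cases l <;> rfl

theorem opt_collapse (c1 c2 : Bool) :
    (if c1 = true then (some false : Option Bool) else if c2 = true then some false else some true) =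
      some (!(c1 || c2)) := by
  cases c1 <;> cases c2 <;> rfl

-- ===== VERDICT (by name: the statement is the Claim_ definition above) =====
theorem isFieldsAllowed_spec : Claim_equal_isFieldsAllowed := by
  intro fields a d _
  unfold Spec_isFieldsAllowed isFieldsAllowed isFieldsAllowed_alt
  by_cases hE : fields.isEmpty = true
  · rw [if_pos hE, if_pos hE]
  · by_cases hN : (a.isNone && d.isNone) = true
    · rw [if_neg hE, if_pos hN, if_neg hE, if_pos hN]
    · rw [if_neg hE, if_neg hN, if_neg hE, if_neg hN, pvLoopA_eq_all]
      simp only [pvTruthy_eq, pvTruthyB_eq, if_truthy_ofList, opt_collapse, Option.some.injEq]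
      generalize (a.getD [] : List String) = La
      generalize (d.getD [] : List String) = Ld
      rw [Bool.eq_iff_iff]
      simp [List.isEmpty_iff, List.eq_nil_iff_forall_not_mem,
        PySem.Set.mem_ofList, PySem.Set.mem_diff, PySem.Set.mem_inter]
      by_cases hid : "_id" ∈ Ld
      · have h1 : ¬(∀ a : String, a ∉ Ld) := fun h => h _ hid
        simp [hid, h1, PySem.Set.mem_ofList]
        constructor
        · intro h
          obtain ⟨f0, hf0⟩ : ∃ x, x ∈ fields := by
            cases fields with
            | nil => simp at hE
            | cons y ys => exact ⟨y, List.mem_cons_self ..⟩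
          have key : ∀ x ∈ fields,
              ((∀ a : String, a ∉ La) ∨ x ∈ La ∨ "$all" ∈ La) ∧ x ∉ Ld ∧ "$all" ∉ Ld := by
            intro x hx
            rcases h x hx with ⟨hxid, _, hnot⟩ | hk
            · exact absurd (by rw [hxid]; exact hid) hnot
            · exact hk
          constructor
          · by_cases hLa : ∀ a : String, a ∉ La
            · exact Or.inl hLa
            by_cases hall : "$all" ∈ La
            · exact Or.inr (Or.inl hall)
            refine Or.inr (Or.inr fun x hx => ?_)
            rcases (key x hx).1 with h' | h' | h'
            · exact absurd h' hLa
            · exact h'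
            · exact absurd h' hall
          · exact Or.inr ⟨(key f0 hf0).2.2, fun x hx => (key x hx).2.1⟩
        · rintro ⟨hA, hD⟩ x hx
          refine Or.inr ⟨?_, ?_, ?_⟩
          · rcases hA with h' | h' | h'
            · exact Or.inl h'
            · exact Or.inr (Or.inr h')
            · exact Or.inr (Or.inl (h' x hx))
          · rcases hD with h' | h'
            · exact absurd hx (h' x)
            · exact h'.2 x hx
          · rcases hD with h' | h'
            · exact absurd hx (h' x)
            · exact h'.1
      · simp [hid, PySem.Set.mem_ofList, PySem.Set.mem_discard]
        constructor
        · intro h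
          have key : ∀ x ∈ fields, ¬x = "_id" →
              ((∀ a : String, a ∉ La) ∨ x ∈ La ∨ "$all" ∈ La) ∧
                ((∀ a : String, a ∉ Ld) ∨ (x ∉ Ld ∧ "$all" ∉ Ld)) := by
            intro x hx hne
            rcases h x hx with ⟨h', _⟩ | hk
            · exact absurd h' hne
            · exact hk
          constructor
          · by_cases hLa : ∀ a : String, a ∉ La
            · exact Or.inl hLa
            by_cases hall : "$all" ∈ La
            · exact Or.inr (Or.inl hall)
            refine Or.inr (Or.inr fun x hx hne => ?_)
            rcases (key x hx hne).1 with h' | h' | h'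
            · exact absurd h' hLa
            · exact h'
            · exact absurd h' hall
          · by_cases hLd : ∀ a : String, a ∉ Ld
            · exact Or.inl hLd
            by_cases hallid : ∀ a ∈ fields, a = "_id"
            · exact Or.inr (Or.inl hallid)
            push Not at hallid
            obtain ⟨f0, hf0, hf0ne⟩ := hallid
            refine Or.inr (Or.inr ⟨?_, fun x hx hne => ?_⟩)
            · rcases (key f0 hf0 hf0ne).2 with h' | h'
              · exact absurd h' hLd
              · exact h'.2
            · rcases (key x hx hne).2 with h' | h'
              · exact h' x
              · exact h'.1
        · rintro ⟨hA, hD⟩ x hx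
          by_cases hxid : x = "_id"
          · refine Or.inl ⟨hxid, ?_⟩
            by_cases hLd : ∀ a : String, a ∉ Ld
            · exact Or.inl hLd
            push Not at hLd
            obtain ⟨g, hg⟩ := hLd
            exact Or.inr ⟨⟨g, hg⟩, by rw [hxid]; exact hid⟩
          · refine Or.inr ⟨?_, ?_⟩
            · rcases hA with h' | h' | h'
              · exact Or.inl h'
              · exact Or.inr (Or.inr h')
              · exact Or.inr (Or.inl (h' x hx hxid))
            · rcases hD with h' | h' | h'
              · exact Or.inl h'
              · exact absurd (h' x hx) hxid
              · exact Or.inr ⟨h'.2 x hx hxid, h'.1⟩
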